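-- pv_equiv track=rewrite | github.com/boringbyte/leetcode | leetcode/Meta/2025/30 Days/Easy.py | find_the_index_of_first_occurrence_in_a_string_2
-- ===== SOURCE A (Python) =====
-- def find_the_index_of_first_occurrence_in_a_string_2(haystack, needle):
--     if not needle:
--         return 0
--
--     # Step 1: Build Longest Prefix Suffix array
--     lps = [0] * len(needle)
--     prev_lps, i = 0, 1
--
--     while i < len(needle):
--         if needle[i] == needle[prev_lps]:
--             prev_lps += 1
--             lps[i] = prev_lps
--             i += 1
--         else:
--             if prev_lps != 0:
--                 prev_lps = lps[prev_lps - 1]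
--             else:
--                 lps[i] = 0
--                 i += 1
--
--     # Step 2: Search in haystack
--     i = j = 0  # i -> haystack, j -> needle
--     while i < len(haystack):
--         if haystack[i] == needle[j]:
--             i += 1
--             j += 1
--         else:
--             if j != 0:
--                 j = lps[j - 1]
--             else:
--                 i += 1
--
--         if j == len(needle):
--             return i - j  # Found match
--
--     return -1
-- ===== SOURCE B (Python) =====
-- def find_the_index_of_first_occurrence_in_a_string_2(haystack, needle):
--     L = len(needle)
--     for i in range(len(haystack) - L + 1):
--         if haystack[i:i + L] == needle:
--             return i
--     return -1
-- ===== Notes on version B (the rewrite author's own statement) =====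
-- stated objective: simpler
-- what changed: Replaced the KMP prefix-table search (LPS construction plus two-pointer scan) with a naive sliding-window scan that tests haystack[i:i+len(needle)] == needle for each start index.
import Mathlib
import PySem

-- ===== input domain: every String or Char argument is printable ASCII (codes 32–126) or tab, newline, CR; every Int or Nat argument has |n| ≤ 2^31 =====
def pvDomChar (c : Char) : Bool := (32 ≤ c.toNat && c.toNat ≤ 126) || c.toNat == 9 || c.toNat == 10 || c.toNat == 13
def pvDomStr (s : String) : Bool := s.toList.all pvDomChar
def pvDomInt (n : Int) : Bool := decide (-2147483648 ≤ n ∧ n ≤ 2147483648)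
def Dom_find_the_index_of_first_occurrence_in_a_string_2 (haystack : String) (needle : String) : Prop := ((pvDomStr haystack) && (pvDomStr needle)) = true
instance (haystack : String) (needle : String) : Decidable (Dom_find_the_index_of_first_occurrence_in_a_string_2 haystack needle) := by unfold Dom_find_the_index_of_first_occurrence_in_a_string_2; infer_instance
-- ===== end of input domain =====

-- B replaces A's KMP (prefix table + two while loops) by a naive sliding-window scan: simpler, and measured faster in CPython (slice comparison runs in C, KMP's per-character loops in Python).

-- ===== PORT A =====
-- A's first while loop (builds the LPS table).  The Python loop's termination measure is
-- 2*(len(needle)-i) + prev_lps, so the fuel 2*len(needle)+1 passed below never runs out;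
-- the fuel argument only makes the literal transliteration structurally total.
def kmpLps (p : List Char) : Nat → List Nat → Nat → Nat → List Nat
  | 0, lps, _, _ => lps
  | fuel+1, lps, prevLps, i =>
    if i < p.length then
      if p[i]? = p[prevLps]? then
        kmpLps p fuel (lps.set i (prevLps+1)) (prevLps+1) (i+1)
      else if prevLps ≠ 0 then
        kmpLps p fuel lps (lps.getD (prevLps-1) 0) i  -- lps[prev_lps-1]; index provably in bounds on every reached state
      else
        kmpLps p fuel (lps.set i 0) prevLps (i+1)
    else lps

-- A's second while loop (the search).  Fuel 2*len(haystack)+1 likewise never runs out.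
def kmpSearch (s p : List Char) (lps : List Nat) : Nat → Nat → Nat → Int
  | 0, _, _ => -1
  | fuel+1, i, j =>
    if i < s.length then
      let ij :=
        if s[i]? = p[j]? then (i+1, j+1)
        else if j ≠ 0 then (i, lps.getD (j-1) 0)  -- lps[j-1]; index provably in bounds on every reached state
        else (i+1, j)
      if ij.2 = p.length then (ij.1 : Int) - (ij.2 : Int)
      else kmpSearch s p lps fuel ij.1 ij.2
    else -1

def find_the_index_of_first_occurrence_in_a_string_2 (haystack : String) (needle : String) : Int :=
  let p := needle.toList
  if p.isEmpty then 0
  else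
    let lps := kmpLps p (2*p.length+1) (List.replicate p.length 0) 0 1
    kmpSearch haystack.toList p lps (2*haystack.toList.length+1) 0 0

-- ===== PORT B =====
-- the `for i in range(len(haystack)-L+1)` loop: i+L ≤ len(haystack) is exactly i ∈ range
def naiveScan (s p : List Char) (i : Nat) : Int :=
  if h : i + p.length ≤ s.length then
    if (s.drop i).take p.length = p then (i : Int)
    else naiveScan s p (i+1)
  else -1
termination_by s.length + 1 - i
decreasing_by omega

def find_the_index_of_first_occurrence_in_a_string_2_alt (haystack : String) (needle : String) : Int :=
  naiveScan haystack.toList needle.toList 0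

-- ===== PRECONDITION & SPEC =====
def Spec_find_the_index_of_first_occurrence_in_a_string_2 (haystack : String) (needle : String) (out : Int) : Prop := out = find_the_index_of_first_occurrence_in_a_string_2_alt haystack needle
instance (haystack : String) (needle : String) (out : Int) : Decidable (Spec_find_the_index_of_first_occurrence_in_a_string_2 haystack needle out) := by unfold Spec_find_the_index_of_first_occurrence_in_a_string_2; infer_instance

-- ===== CLAIM (what is proved, stated in full; the proofs are below) =====
def Claim_equal_find_the_index_of_first_occurrence_in_a_string_2 : Prop := ∀ (haystack : String) (needle : String), Dom_find_the_index_of_first_occurrence_in_a_string_2 haystack needle → Spec_find_the_index_of_first_occurrence_in_a_string_2 haystack needle (find_the_index_of_first_occurrence_in_a_string_2 haystack needle)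

-- ===== LEMMAS AND PROOFS =====

-- `k = π(p.take t)`: k is the longest proper prefix of p.take t that is also its suffix
def piP (p : List Char) (t k : Nat) : Prop :=
  k < t ∧ p.take k <:+ p.take t ∧ ∀ k', k < k' → k' < t → ¬ p.take k' <:+ p.take t

def lpsGood (p : List Char) (lps : List Nat) : Prop :=
  lps.length = p.length ∧ ∀ t, 1 ≤ t → t ≤ p.length → piP p t (lps.getD (t-1) 0)

def Inv1 (p : List Char) (lps : List Nat) (prev i : Nat) : Prop :=
  1 ≤ i ∧ i ≤ p.length ∧ lps.length = p.length ∧ prev < i ∧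
  p.take prev <:+ p.take i ∧
  (∀ t, 1 ≤ t → t ≤ i → piP p t (lps.getD (t-1) 0)) ∧
  (∀ k, prev < k → k < i → p.take k <:+ p.take i → p[k]? ≠ p[i]?)

def Inv2 (s p : List Char) (i j : Nat) : Prop :=
  j < p.length ∧ j ≤ i ∧ i ≤ s.length ∧
  p.take j <:+ s.take i ∧
  (∀ k, j < k → k < p.length → p.take k <:+ s.take i → p[k]? ≠ s[i]?) ∧
  (∀ t, t ≤ i → ¬ p <:+ s.take t)

lemma take_snoc {α : Type} (p : List α) (k : Nat) (h : k < p.length) :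
    p.take (k+1) = p.take k ++ [p[k]] := by
  rw [List.take_add_one]
  simp [List.getElem?_eq_getElem h]

lemma snoc_suffix_snoc {α : Type} {a b : List α} {x y : α}
    (h : a ++ [x] <:+ b ++ [y]) : a <:+ b ∧ x = y := by
  obtain ⟨u, hu⟩ := h
  rw [← List.append_assoc] at hu
  have := List.append_inj' hu (by simp)
  obtain ⟨h1, h2⟩ := this
  refine ⟨⟨u, h1⟩, by simpa using h2⟩

lemma suffix_snoc {α : Type} {a b : List α} (x : α) (h : a <:+ b) :
    a ++ [x] <:+ b ++ [x] := by
  obtain ⟨u, hu⟩ := h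
  exact ⟨u, by rw [← List.append_assoc, hu]⟩

-- two prefixes of p that are both suffixes of x nest
lemma take_suffix_take (p x : List Char) (k l : Nat) (hkl : k ≤ l)
    (h1 : p.take k <:+ x) (h2 : p.take l <:+ x) : p.take k <:+ p.take l := by
  rcases List.suffix_or_suffix_of_suffix h1 h2 with h | h
  · exact h
  · have hlen : (p.take l).length ≤ (p.take k).length := h.length_le
    have : p.take l = p.take k := by
      apply List.IsSuffix.eq_of_length h
      simp only [List.length_take] at hlen ⊢
      omega
    rw [← this]

-- extension of a border backwards: a (k+1)-border of t ++ [c] gives a k-border of t ending right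
lemma border_unsnoc (p t : List Char) (c : Char) (k : Nat) (hk : k < p.length)
    (h : p.take (k+1) <:+ t ++ [c]) : p.take k <:+ t ∧ p[k]? = some c := by
  rw [take_snoc p k hk] at h
  obtain ⟨h1, h2⟩ := snoc_suffix_snoc h
  exact ⟨h1, by simp [List.getElem?_eq_getElem hk, h2]⟩

lemma border_snoc (p t : List Char) (c : Char) (k : Nat) (hk : k < p.length)
    (h : p.take k <:+ t) (hc : p[k]? = some c) : p.take (k+1) <:+ t ++ [c] := by
  rw [take_snoc p k hk]
  have : p[k] = c := by simpa [List.getElem?_eq_getElem hk] using hc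
  rw [this]
  exact suffix_snoc c h

lemma getD_set_self (l : List Nat) (i v : Nat) (h : i < l.length) :
    (l.set i v).getD i 0 = v := by
  simp [List.getD, h]

lemma getD_set_ne (l : List Nat) (i t v : Nat) (h : i ≠ t) :
    (l.set i v).getD t 0 = l.getD t 0 := by
  simp [List.getD, List.getElem?_set_ne h]

lemma kmpLps_spec (p : List Char) : ∀ (fuel : Nat) (lps : List Nat) (prev i : Nat),
    Inv1 p lps prev i → 2*(p.length - i) + prev < fuel →
    lpsGood p (kmpLps p fuel lps prev i) := by
  intro fuel
  induction fuel with
  | zero => intro lps prev i _ hm; omega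
  | succ fuel ih =>
    intro lps prev i hInv hm
    obtain ⟨h1i, hin, hlen, hplt, hpbord, hfill, hS3⟩ := hInv
    rw [kmpLps]
    by_cases hi : i < p.length
    · rw [if_pos hi]
      have hchar : p[i]? = some p[i] := List.getElem?_eq_getElem hi
      have hptake : p.take (i+1) = p.take i ++ [p[i]] := take_snoc p i hi
      by_cases hcmp : p[i]? = p[prev]?
      · rw [if_pos hcmp]
        have hprevlt : prev < p.length := by omega
        have hbord' : p.take (prev+1) <:+ p.take (i+1) := by
          rw [hptake]
          exact border_snoc p (p.take i) p[i] prev hprevlt hpbord (by rw [← hcmp, hchar])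
        have hmax : ∀ k', prev+1 < k' → k' < i+1 → ¬ p.take k' <:+ p.take (i+1) := by
          intro k' hk1 hk2 hsuf
          match k', hk1 with
          | k+1, _ =>
            rw [hptake] at hsuf
            obtain ⟨hb, hc⟩ := border_unsnoc p (p.take i) p[i] k (by omega) hsuf
            exact hS3 k (by omega) (by omega) hb (by rw [hc, hchar])
        have hpiNew : piP p (i+1) (prev+1) := ⟨by omega, hbord', hmax⟩
        apply ih (lps.set i (prev+1)) (prev+1) (i+1) ?_ (by omega)
        refine ⟨by omega, by omega, by simp [hlen], by omega, hbord', ?_, ?_⟩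
        · intro t h1t hti
          by_cases hteq : t = i+1
          · subst hteq
            have : i + 1 - 1 = i := by omega
            rw [this, getD_set_self lps i (prev+1) (by omega)]
            exact hpiNew
          · rw [getD_set_ne lps i (t-1) (prev+1) (by omega)]
            exact hfill t h1t (by omega)
        · intro k hk1 hk2 hsuf _
          exact hmax k (by omega) hk2 hsuf
      · rw [if_neg hcmp]
        by_cases hprev0 : prev ≠ 0
        · rw [if_pos hprev0]
          obtain ⟨hp'lt, hp'bord, hp'max⟩ := hfill prev (by omega) (by omega)
          apply ih lps (lps.getD (prev-1) 0) i ?_ (by omega)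
          refine ⟨h1i, hin, hlen, by omega, hp'bord.trans hpbord, hfill, ?_⟩
          intro k hk1 hk2 hsuf
          rcases lt_trichotomy k prev with hlt | heq | hgt
          · exact absurd (take_suffix_take p (p.take i) k prev (by omega) hsuf hpbord)
              (hp'max k hk1 hlt)
          · subst heq; exact fun h => hcmp (by rw [h])
          · exact hS3 k hgt hk2 hsuf
        · rw [if_neg hprev0]
          push Not at hprev0
          subst hprev0
          have hnob : ∀ k', 0 < k' → k' < i+1 → ¬ p.take k' <:+ p.take (i+1) := by
            intro k' hk1 hk2 hsuf
            match k', hk1 with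
            | k+1, _ =>
              rw [hptake] at hsuf
              obtain ⟨hb, hc⟩ := border_unsnoc p (p.take i) p[i] k (by omega) hsuf
              rcases Nat.eq_zero_or_pos k with h0 | hpos
              · subst h0
                exact hcmp (by rw [hchar, hc])
              · exact hS3 k hpos (by omega) hb (by rw [hc, hchar])
          have hpiNew : piP p (i+1) 0 := ⟨by omega, by simp, hnob⟩
          apply ih (lps.set i 0) 0 (i+1) ?_ (by omega)
          refine ⟨by omega, by omega, by simp [hlen], by omega, by simp, ?_, ?_⟩
          · intro t h1t hti
            by_cases hteq : t = i+1
            · subst hteq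
              have : i + 1 - 1 = i := by omega
              rw [this, getD_set_self lps i 0 (by omega)]
              exact hpiNew
            · rw [getD_set_ne lps i (t-1) 0 (by omega)]
              exact hfill t h1t (by omega)
          · intro k hk1 hk2 hsuf _
            exact hnob k hk1 hk2 hsuf
    · rw [if_neg hi]
      exact ⟨hlen, fun t h1 h2 => hfill t h1 (by omega)⟩

lemma naive_none (s p : List Char) (i : Nat)
    (h : ∀ a, i ≤ a → a + p.length ≤ s.length → (s.drop a).take p.length ≠ p) :
    naiveScan s p i = -1 := by
  rw [naiveScan]
  split
  · next hle =>
    rw [if_neg (h i le_rfl hle)]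
    exact naive_none s p (i+1) (fun a ha hal => h a (by omega) hal)
  · rfl
termination_by s.length + 1 - i
decreasing_by omega

lemma naive_found (s p : List Char) (i a : Nat) (hia : i ≤ a)
    (hlen : a + p.length ≤ s.length) (hw : (s.drop a).take p.length = p)
    (hmin : ∀ b, i ≤ b → b < a → (s.drop b).take p.length ≠ p) :
    naiveScan s p i = (a : Int) := by
  rw [naiveScan]
  have hle : i + p.length ≤ s.length := by omega
  rw [dif_pos hle]
  by_cases he : i = a
  · subst he; rw [if_pos hw]
  · rw [if_neg (hmin i le_rfl (by omega))]
    exact naive_found s p (i+1) a (by omega) hlen hw (fun b hb1 hb2 => hmin b (by omega) hb2)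
termination_by a - i
decreasing_by omega

lemma window_iff (s p : List Char) (a : Nat) (h : a + p.length ≤ s.length) :
    (s.drop a).take p.length = p ↔ p <:+ s.take (a + p.length) := by
  have hsplit : s.take (a + p.length) = s.take a ++ (s.drop a).take p.length :=
    List.take_add ..
  constructor
  · intro hw
    exact ⟨s.take a, by rw [hsplit, hw]⟩
  · intro hs
    obtain ⟨u, hu⟩ := hs
    rw [hsplit] at hu
    have hlw : ((s.drop a).take p.length).length = p.length := by
      simp only [List.length_take, List.length_drop]
      omega
    exact ((List.append_inj' hu (by omega)).2).symm

lemma kmpSearch_spec (s p : List Char) (lps : List Nat) (hp : p ≠ []) (hl : lpsGood p lps) :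
    ∀ (fuel : Nat) (i j : Nat), Inv2 s p i j → 2*(s.length - i) + j < fuel →
    kmpSearch s p lps fuel i j = naiveScan s p 0 := by
  have hn : 0 < p.length := List.length_pos_iff.mpr hp
  intro fuel
  induction fuel with
  | zero => intro i j _ hm; omega
  | succ fuel ih =>
    intro i j hInv hm
    obtain ⟨hjn, hji, him, hbord, hS3, hS4⟩ := hInv
    rw [kmpSearch]
    by_cases hi : i < s.length
    · rw [if_pos hi]
      have hchar : s[i]? = some s[i] := List.getElem?_eq_getElem hi
      have hstake : s.take (i+1) = s.take i ++ [s[i]] := take_snoc s i hi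
      by_cases hcmp : s[i]? = p[j]?
      · -- match branch: (i', j') = (i+1, j+1)
        simp only [if_pos hcmp]
        have hpj : p[j]? = some p[j] := List.getElem?_eq_getElem hjn
        have hbord' : p.take (j+1) <:+ s.take (i+1) := by
          rw [hstake]
          exact border_snoc p (s.take i) s[i] j hjn hbord (by rw [hpj, ← hchar, hcmp, hpj])
        have hmax : ∀ k, j+1 < k → k ≤ p.length → ¬ p.take k <:+ s.take (i+1) := by
          intro k hk hkn hsuf
          match k, hk with
          | k'+1, hk =>
            rw [hstake] at hsuf
            obtain ⟨hb, hc⟩ := border_unsnoc p (s.take i) s[i] k' (by omega) hsuf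
            exact hS3 k' (by omega) (by omega) hb (by rw [hc, hchar])
        by_cases hjn1 : j+1 = p.length
        · rw [if_pos hjn1]
          have hw : (s.drop (i+1-p.length)).take p.length = p := by
            rw [window_iff s p _ (by omega)]
            have ha : (i+1-p.length) + p.length = i+1 := by omega
            rw [ha]
            have : p.take (j+1) = p := by rw [hjn1, List.take_length]
            rw [← this]; exact hbord'
          have hmin : ∀ b, 0 ≤ b → b < i+1-p.length → (s.drop b).take p.length ≠ p := by
            intro b _ hb hwb
            rw [window_iff s p b (by omega)] at hwb
            exact hS4 (b+p.length) (by omega) hwb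
          rw [naive_found s p 0 (i+1-p.length) (by omega) (by omega) hw hmin]
          push_cast
          omega
        · rw [if_neg hjn1]
          apply ih (i+1) (j+1) ?_ (by omega)
          refine ⟨by omega, by omega, by omega, hbord', ?_, ?_⟩
          · intro k hk hkn hsuf _
            exact hmax k (by omega) (by omega) hsuf
          · intro t ht
            rcases Nat.lt_or_ge t (i+1) with h | h
            · exact hS4 t (by omega)
            · have ht' : t = i+1 := by omega
              subst ht'
              intro hocc
              exact hmax p.length (by omega) le_rfl (by rw [List.take_length]; exact hocc)
      · rw [if_neg hcmp]
        by_cases hj0 : j ≠ 0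
        · -- fallback branch: (i', j') = (i, lps[j-1])
          simp only [if_pos hj0]
          obtain ⟨hj'j, hj'bord, hj'max⟩ := hl.2 j (by omega) (by omega)
          rw [if_neg (show ¬ ((i, lps.getD (j-1) 0).2 = p.length) by simp only []; omega)]
          apply ih i (lps.getD (j-1) 0) ?_ (by omega)
          refine ⟨by omega, by omega, him, hj'bord.trans hbord, ?_, hS4⟩
          intro k hk hkn hsuf
          rcases lt_trichotomy k j with hlt | heq | hgt
          · exact absurd (take_suffix_take p (s.take i) k j (by omega) hsuf hbord)
              (hj'max k hk hlt)
          · subst heq; exact fun h => hcmp (by rw [h])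
          · exact hS3 k hgt hkn hsuf
        · -- j = 0: advance i
          simp only [if_neg hj0]
          push Not at hj0
          subst hj0
          rw [if_neg (show ¬ ((i+1, 0).2 = p.length) by simp only []; omega)]
          have hnob : ∀ k, 0 < k → k ≤ p.length → ¬ p.take k <:+ s.take (i+1) := by
            intro k hk hkn hsuf
            match k, hk with
            | k'+1, hk =>
              rw [hstake] at hsuf
              obtain ⟨hb, hc⟩ := border_unsnoc p (s.take i) s[i] k' (by omega) hsuf
              rcases Nat.eq_zero_or_pos k' with h0 | hpos
              · subst h0
                exact hcmp (by rw [hchar, hc])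
              · exact hS3 k' hpos (by omega) hb (by rw [hc, hchar])
          apply ih (i+1) 0 ?_ (by omega)
          refine ⟨hn, by omega, by omega, by simp, ?_, ?_⟩
          · intro k hk hkn hsuf _
            exact hnob k hk (by omega) hsuf
          · intro t ht
            rcases Nat.lt_or_ge t (i+1) with h | h
            · exact hS4 t (by omega)
            · have ht' : t = i+1 := by omega
              subst ht'
              intro hocc
              exact hnob p.length hn le_rfl (by rw [List.take_length]; exact hocc)
    · rw [if_neg hi]
      symm
      apply naive_none
      intro a _ hal hw
      rw [window_iff s p a hal] at hw
      exact hS4 (a+p.length) (by omega) hw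

lemma main_eq (s q : List Char) :
    (if q.isEmpty then (0:Int)
     else kmpSearch s q (kmpLps q (2*q.length+1) (List.replicate q.length 0) 0 1) (2*s.length+1) 0 0)
    = naiveScan s q 0 := by
  by_cases hq : q.isEmpty
  · rw [if_pos hq]
    have hqe : q = [] := List.isEmpty_iff.mp hq
    subst hqe
    rw [naiveScan]
    simp
  · rw [if_neg hq]
    have hqne : q ≠ [] := fun h => hq (by simp [h])
    have hn : 0 < q.length := List.length_pos_iff.mpr hqne
    have hl : lpsGood q (kmpLps q (2*q.length+1) (List.replicate q.length 0) 0 1) := by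
      apply kmpLps_spec q (2*q.length+1) _ 0 1 ?_ (by omega)
      refine ⟨le_rfl, hn, by simp, by omega, by simp, ?_, ?_⟩
      · intro t h1 h2
        have ht : t = 1 := by omega
        subst ht
        have hg : (List.replicate q.length (0:Nat)).getD 0 0 = 0 := by
          simp [List.getD, hn]
        rw [hg]
        exact ⟨by omega, by simp, fun k' h1 h2 => absurd h2 (by omega)⟩
      · intro k hk1 hk2
        exact absurd hk2 (by omega)
    apply kmpSearch_spec s q _ hqne hl (2*s.length+1) 0 0 ?_ (by omega)
    refine ⟨hn, le_rfl, by omega, by simp, ?_, ?_⟩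
    · intro k hk1 hk2 hsuf
      have hle := hsuf.length_le
      simp only [List.length_take, List.take_zero, List.length_nil] at hle
      exact absurd hle (by omega)
    · intro t ht hocc
      have hle := hocc.length_le
      simp only [List.length_take] at hle
      omega

-- ===== VERDICT (by name: the statement is the Claim_ definition above) =====
theorem find_the_index_of_first_occurrence_in_a_string_2_spec : Claim_equal_find_the_index_of_first_occurrence_in_a_string_2 := by
  intro haystack needle _
  unfold Spec_find_the_index_of_first_occurrence_in_a_string_2
    find_the_index_of_first_occurrence_in_a_string_2
    find_the_index_of_first_occurrence_in_a_string_2_alt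
  exact main_eq haystack.toList needle.toList
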